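-- pv_equiv track=rewrite | github.com/ncubo/tfm-generacion-musical-emocionalmente-adaptativa-usando-ia | backend/src/core/music/baseline_rules.py | _build_scale_notes
-- ===== SOURCE A (Python) =====
-- from typing import Dict, List, Optional, Tuple
--
-- SCALES = {
--     'major': [0, 2, 4, 5, 7, 9, 11],      # Escala mayor (Jónico)
--     'minor': [0, 2, 3, 5, 7, 8, 10]       # Escala menor natural (Eólico)
-- }
--
-- def _build_scale_notes(
--     mode: str,
--     pitch_low: int,
--     pitch_high: int,
--     root_note: int = 60
-- ) -> List[int]:
--     """
--     Construye una lista de notas MIDI válidas según la escala y rango.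
--
--     Args:
--         mode (str): Modo musical ('major' o 'minor')
--         pitch_low (int): Nota MIDI más grave permitida
--         pitch_high (int): Nota MIDI más aguda permitida
--         root_note (int): Tónica de la escala (default C4 = 60)
--
--     Returns:
--         List[int]: Lista de notas MIDI válidas ordenadas
--     """
--     scale_intervals = SCALES.get(mode, SCALES['major'])
--     notes = []
--
--     # Generar notas en múltiples octavas
--     for octave_offset in range(-3, 4):  # 7 octavas
--         for interval in scale_intervals:
--             note = root_note + octave_offset * 12 + interval
--             if pitch_low <= note <= pitch_high:
--                 notes.append(note)
--
--     return sorted(list(set(notes)))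
-- ===== SOURCE B (Python) =====
-- SCALES = {
--     'major': [0, 2, 4, 5, 7, 9, 11],
--     'minor': [0, 2, 3, 5, 7, 8, 10]
-- }
--
-- def _build_scale_notes(mode, pitch_low, pitch_high, root_note=60):
--     # Scan the requested pitch range once (clamped to the scale's 7-octave span
--     # root-36 .. root+47) and keep the notes whose pitch class is in the scale.
--     intervals = set(SCALES.get(mode, SCALES['major']))
--     lo = max(pitch_low, root_note - 36)
--     hi = min(pitch_high, root_note + 47)
--     return [n for n in range(lo, hi + 1) if (n - root_note) % 12 in intervals]
-- ===== Notes on version B (the rewrite author's own statement) =====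
-- stated objective: alternative
-- what changed: B replaces A's octave-by-interval grid generation followed by set-dedup and sort with a single ascending scan of the pitch range (clamped to the scale's 7-octave span root-36..root+47) keeping the notes whose pitch class (note - root) % 12 lies in the scale; no set or sort is needed since the scan is ascending and duplicate-free.
import Mathlib
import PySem

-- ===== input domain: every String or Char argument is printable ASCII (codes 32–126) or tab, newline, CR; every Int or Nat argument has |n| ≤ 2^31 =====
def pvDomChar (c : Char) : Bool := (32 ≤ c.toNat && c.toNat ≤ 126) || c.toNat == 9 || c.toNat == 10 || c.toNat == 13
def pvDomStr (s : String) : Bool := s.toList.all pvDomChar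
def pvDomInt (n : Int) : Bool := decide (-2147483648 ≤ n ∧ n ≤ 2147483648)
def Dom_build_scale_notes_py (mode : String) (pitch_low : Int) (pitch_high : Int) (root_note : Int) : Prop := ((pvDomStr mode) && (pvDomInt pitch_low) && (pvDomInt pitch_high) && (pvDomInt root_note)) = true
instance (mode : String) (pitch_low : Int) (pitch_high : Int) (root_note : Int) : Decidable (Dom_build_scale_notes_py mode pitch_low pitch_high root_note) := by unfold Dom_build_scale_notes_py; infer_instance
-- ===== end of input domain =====

-- B replaces A's octave×interval grid generation plus set/sort by a single ascending scan of the
-- clamped pitch range with a pitch-class membership test (objective: alternative; same tiny cost).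

-- module constant SCALES, used by both programs
def pvSCALES : PySem.Dict String (List Int) :=
  PySem.Dict.ofList [("major", [0, 2, 4, 5, 7, 9, 11]), ("minor", [0, 2, 3, 5, 7, 8, 10])]

-- ===== PORT A =====
-- SCALES['major'] cannot raise (the key is present), so getD with any default is exact.
def build_scale_notes_py (mode : String) (pitch_low : Int) (pitch_high : Int) (root_note : Int) : List Int :=
  let scale_intervals := pvSCALES.getD mode (pvSCALES.getD "major" [])
  let notes : List Int :=
    (PySem.List.pyRange (-3) 4 1).foldl (fun notes octave_offset =>
      scale_intervals.foldl (fun notes interval =>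
        let note := root_note + octave_offset * 12 + interval
        if pitch_low ≤ note ∧ note ≤ pitch_high then notes ++ [note] else notes) notes) []
  PySem.List.sorted (PySem.Set.ofList notes) (fun x => x) false

-- ===== PORT B =====
def build_scale_notes_py_alt (mode : String) (pitch_low : Int) (pitch_high : Int) (root_note : Int) : List Int :=
  let intervals : PySem.Set Int := PySem.Set.ofList (pvSCALES.getD mode (pvSCALES.getD "major" []))
  let lo := max pitch_low (root_note - 36)
  let hi := min pitch_high (root_note + 47)
  (PySem.List.pyRange lo (hi + 1) 1).filter
    (fun n => PySem.Set.contains intervals (PySem.Int.mod (n - root_note) 12))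

-- ===== PRECONDITION & SPEC =====
def Spec_build_scale_notes_py (mode : String) (pitch_low : Int) (pitch_high : Int) (root_note : Int) (out : List Int) : Prop := out = build_scale_notes_py_alt mode pitch_low pitch_high root_note
instance (mode : String) (pitch_low : Int) (pitch_high : Int) (root_note : Int) (out : List Int) : Decidable (Spec_build_scale_notes_py mode pitch_low pitch_high root_note out) := by unfold Spec_build_scale_notes_py; infer_instance

-- ===== CLAIM (what is proved, stated in full; the proofs are below) =====
def Claim_equal_build_scale_notes_py : Prop := ∀ (mode : String) (pitch_low : Int) (pitch_high : Int) (root_note : Int), Dom_build_scale_notes_py mode pitch_low pitch_high root_note → Spec_build_scale_notes_py mode pitch_low pitch_high root_note (build_scale_notes_py mode pitch_low pitch_high root_note)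

-- ===== LEMMAS AND PROOFS =====

-- A's inner loop over the intervals is 'append the in-range notes of this octave'.
theorem pvInner (pl ph c : Int) (I : List Int) (acc : List Int) :
    I.foldl (fun ns i => if pl ≤ c + i ∧ c + i ≤ ph then ns ++ [c + i] else ns) acc
    = acc ++ (I.map (fun i => c + i)).filter (fun n => decide (pl ≤ n ∧ n ≤ ph)) := by
  induction I generalizing acc with
  | nil => simp
  | cons i t ih =>
    simp only [List.foldl_cons, List.map_cons, List.filter_cons]
    by_cases h : pl ≤ c + i ∧ c + i ≤ ph
    · rw [if_pos h, ih]; simp [h]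
    · rw [if_neg h, ih]; simp [h]

-- filtering a unit-step range by a ≤ k ≤ b clamps it
theorem pvFilterBounds (a b : Int) : ∀ (n : Nat) (lo hi : Int), (hi - lo).toNat = n →
    (PySem.List.pyRange lo hi 1).filter (fun k => decide (a ≤ k ∧ k ≤ b))
    = PySem.List.pyRange (max a lo) (min b (hi - 1) + 1) 1 := by
  intro n
  induction n with
  | zero =>
    intro lo hi h
    rw [PySem.List.pyRange_one_eq_nil (by omega), PySem.List.pyRange_one_eq_nil (by omega)]
    rfl
  | succ n ih =>
    intro lo hi h
    have hlt : lo < hi := by omega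
    rw [PySem.List.pyRange_one_cons hlt, List.filter_cons]
    by_cases h1 : a ≤ lo ∧ lo ≤ b
    · rw [if_pos (by simpa using h1), ih (lo + 1) hi (by omega)]
      have hm1 : max a (lo + 1) = lo + 1 := by omega
      have hm2 : max a lo = lo := by omega
      rw [hm1, hm2, ← PySem.List.pyRange_one_cons (by omega)]
    · rw [if_neg (by simpa using h1), ih (lo + 1) hi (by omega)]
      rcases (by omega : lo < a ∨ b < lo) with hc | hc
      · congr 1; omega
      · rw [PySem.List.pyRange_one_eq_nil (by omega), PySem.List.pyRange_one_eq_nil (by omega)]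

-- a unit-step range shifted by r
theorem pvRangeShift (r a b : Int) :
    PySem.List.pyRange (r + a) (r + b) 1 = (PySem.List.pyRange a b 1).map (fun k => r + k) := by
  rw [PySem.List.pyRange_one, PySem.List.pyRange_one]
  have h : (r + b - (r + a)).toNat = (b - a).toNat := by omega
  rw [h, List.map_map]
  exact List.map_congr_left (fun k _ => by simp [Function.comp]; ring)

-- the generic core: for an interval list whose 7-octave grid is exactly the scale's pitch classes
-- on -36..47, A's body equals B's body
theorem pvMain (I : List Int) (pl ph r : Int)
    (H1 : (PySem.List.pyRange (-3) 4 1).flatMap (fun o => I.map (fun i => o * 12 + i))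
        = (PySem.List.pyRange (-36) 48 1).filter
            (fun k => PySem.Set.contains (PySem.Set.ofList I) (PySem.Int.mod k 12))) :
    PySem.List.sorted (PySem.Set.ofList ((PySem.List.pyRange (-3) 4 1).foldl (fun ns o =>
        I.foldl (fun ns i =>
          if pl ≤ r + o * 12 + i ∧ r + o * 12 + i ≤ ph then ns ++ [r + o * 12 + i] else ns) ns) []))
      (fun x => x) false
    = (PySem.List.pyRange (max pl (r - 36)) (min ph (r + 47) + 1) 1).filter
        (fun n => PySem.Set.contains (PySem.Set.ofList I) (PySem.Int.mod (n - r) 12)) := by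
  -- A side: turn the double loop into map/filter over the grid
  simp only [pvInner pl ph]
  rw [PySem.List.foldl_append_eq_flatMap, List.nil_append]
  have hg : ∀ o : Int, I.map (fun i => r + o * 12 + i)
      = (I.map (fun i => o * 12 + i)).map (fun k => r + k) := by
    intro o
    rw [List.map_map]
    exact List.map_congr_left (fun i _ => by simp [Function.comp]; ring)
  simp only [hg, List.filter_map]
  simp only [← List.filter_map]
  simp only [← List.filter_flatMap]
  simp only [← List.map_flatMap]
  simp only [H1]
  rw [List.filter_map, List.filter_comm]
  have hb : (PySem.List.pyRange (-36) 48 1).filter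
        (fun k => decide (pl ≤ r + k ∧ r + k ≤ ph ))
      = PySem.List.pyRange (max (pl - r) (-36)) (min (ph - r) 47 + 1) 1 := by
    rw [List.filter_congr (l := PySem.List.pyRange (-36) 48 1)
        (q := fun k => decide (pl - r ≤ k ∧ k ≤ ph - r))
        (fun k _ => by simp only [decide_eq_decide]; omega)]
    have := pvFilterBounds (pl - r) (ph - r) (48 - (-36)).toNat (-36) 48 rfl
    simpa using this
  simp only [Function.comp_def] at hb ⊢
  rw [hb]
  -- the remaining A-side list is strictly increasing, so set+sorted is the identity
  have hpw : (((PySem.List.pyRange (max (pl - r) (-36)) (min (ph - r) 47 + 1) 1).filter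
      (fun k => PySem.Set.contains (PySem.Set.ofList I) (PySem.Int.mod k 12))).map
      (fun k => r + k)).Pairwise (· < ·) := by
    refine List.pairwise_map.mpr (((PySem.List.pairwise_lt_pyRange_one _ _).filter _).imp ?_)
    intro a b hab
    omega
  rw [PySem.Set.ofList_eq_self_of_nodup _ (hpw.imp fun h => ne_of_lt h),
    PySem.List.sorted_eq_self_of_pairwise _ _ (hpw.imp fun h => le_of_lt h)]
  -- B side: shift the clamped range by r
  have hmax : max pl (r - 36) = r + max (pl - r) (-36) := by omega
  have hmin : min ph (r + 47) + 1 = r + (min (ph - r) 47 + 1) := by omega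
  rw [hmax, hmin, pvRangeShift, List.filter_map]
  congr 1
  refine List.filter_congr (fun k _ => ?_)
  simp [Function.comp]

theorem pvResolve (mode : String) :
    pvSCALES.getD mode (pvSCALES.getD "major" []) = [0, 2, 4, 5, 7, 9, 11]
    ∨ pvSCALES.getD mode (pvSCALES.getD "major" []) = [0, 2, 3, 5, 7, 8, 10] := by
  by_cases h1 : mode = "major"
  · left; subst h1; decide
  by_cases h2 : mode = "minor"
  · right; subst h2; decide
  left
  have hs : pvSCALES = PySem.Dict.mk [("major", [0, 2, 4, 5, 7, 9, 11]), ("minor", [0, 2, 3, 5, 7, 8, 10])] := by decide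
  rw [hs]
  simp [PySem.Dict.getD, PySem.Dict.get?, beq_iff_eq, Ne.symm h1, Ne.symm h2]

-- ===== VERDICT (by name: the statement is the Claim_ definition above) =====
theorem build_scale_notes_py_spec : Claim_equal_build_scale_notes_py := by
  intro mode pl ph r _
  unfold Spec_build_scale_notes_py
  simp only [build_scale_notes_py, build_scale_notes_py_alt]
  rcases pvResolve mode with h | h <;> rw [h] <;> exact pvMain _ pl ph r (by decide)
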